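-- pv_equiv track=rewrite | github.com/iago84/NAIRATRADING_HUB | scripts/analyze_runs.py | _count
-- ===== SOURCE A (Python) =====
-- from typing import Any, Dict, List, Optional
--
-- def _count(items: List[Dict[str, Any]], key: str) -> Dict[str, int]:
--     out: Dict[str, int] = {}
--     for it in items or []:
--         v = str(it.get(key) or "")
--         if not v:
--             v = "unknown"
--         out[v] = int(out.get(v, 0)) + 1
--     return out
-- ===== SOURCE B (Python) =====
-- def _count(items, key):
--     ks = [(str(it.get(key) or "") or "unknown") for it in (items or [])]
--     out = {}
--     while ks:
--         k = ks[0]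
--         out[k] = len([x for x in ks if x == k])
--         ks = [x for x in ks if x != k]
--     return out
-- ===== Notes on version B (the rewrite author's own statement) =====
-- stated objective: alternative
-- what changed: Replaces A's single-pass incremental dict accumulation with a normalize-then-repeated-partition scheme: the list of normalized keys is whittled down by partitioning on its head key, emitting that key's group size, until empty — no counting container is maintained.
import Mathlib
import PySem

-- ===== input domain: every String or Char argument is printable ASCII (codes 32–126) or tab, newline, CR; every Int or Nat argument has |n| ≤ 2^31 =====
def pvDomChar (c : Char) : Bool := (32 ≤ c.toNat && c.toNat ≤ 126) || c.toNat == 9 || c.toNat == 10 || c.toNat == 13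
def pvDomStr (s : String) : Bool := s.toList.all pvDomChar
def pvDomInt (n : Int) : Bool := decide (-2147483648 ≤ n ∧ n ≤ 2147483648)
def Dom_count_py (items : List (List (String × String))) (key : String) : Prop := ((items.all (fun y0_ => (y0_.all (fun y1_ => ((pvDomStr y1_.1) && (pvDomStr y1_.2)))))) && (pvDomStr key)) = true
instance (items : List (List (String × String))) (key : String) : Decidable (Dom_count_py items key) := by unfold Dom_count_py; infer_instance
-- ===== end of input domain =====

-- B replaces A's incremental dict accumulation with normalize-then-repeated-partition: peel off the head key's whole group each round (alternative decomposition, same result).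


-- ===== PORT A =====
-- 'str(it.get(key) or "")' on string values: the value itself if present and nonempty, else "" (str of a str is itself)
def count_py (items : List (List (String × String))) (key : String) : List (String × Int) :=
  (items.foldl (fun out it =>
      let v0 := ((PySem.Dict.mk it).get? key).getD ""
      let v := if v0 = "" then "unknown" else v0
      out.insert v (out.getD v 0 + 1)) PySem.Dict.empty).items

-- ===== PORT B =====
-- the while loop of Source B: take the head key, emit the size of its group, recurse on the rest
def groupCount : List String → List (String × Int)
  | [] => []
  | k :: t =>
      (k, (((k :: t).filter (fun x => x == k)).length : Int)) ::
        groupCount ((k :: t).filter (fun x => x != k))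
termination_by l => l.length
decreasing_by
  simp only [List.filter_cons, bne_self_eq_false, List.length_cons]
  exact Nat.lt_succ_of_le (List.length_filter_le _ _)

def count_py_alt (items : List (List (String × String))) (key : String) : List (String × Int) :=
  groupCount (items.map (fun it =>
    let v := ((PySem.Dict.mk it).get? key).getD ""
    if v = "" then "unknown" else v))

-- ===== PRECONDITION & SPEC =====
def Spec_count_py (items : List (List (String × String))) (key : String) (out : List (String × Int)) : Prop := out = count_py_alt items key
instance (items : List (List (String × String))) (key : String) (out : List (String × Int)) : Decidable (Spec_count_py items key out) := by unfold Spec_count_py; infer_instance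

-- ===== CLAIM (what is proved, stated in full; the proofs are below) =====
def Claim_equal_count_py : Prop := ∀ (items : List (List (String × String))) (key : String), Dom_count_py items key → Spec_count_py items key (count_py items key)

-- ===== LEMMAS AND PROOFS =====
-- adding to a set already containing k ignores k's, so filtering k's out of the tail changes nothing
theorem foldl_add_filter_ne {α : Type} [BEq α] [LawfulBEq α] (k : α) :
    ∀ (t s : List α), k ∈ s →
      List.foldl PySem.Set.add s t = List.foldl PySem.Set.add s (t.filter (fun x => x != k))
  | [], _, _ => rfl
  | x :: t, s, hk => by
    by_cases hx : x = k
    · subst hx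
      simp only [List.filter_cons, bne_self_eq_false, Bool.false_eq_true, if_false,
        List.foldl_cons, PySem.Set.add_of_mem hk]
      exact foldl_add_filter_ne x t s hk
    · have hb : (x != k) = true := by simp [bne, hx]
      simp only [List.filter_cons, hb, if_true, List.foldl_cons]
      exact foldl_add_filter_ne k t (PySem.Set.add s x)
        ((PySem.Set.mem_add _ _ _).2 (Or.inl hk))

theorem foldl_add_cons_of_not_mem {α : Type} [BEq α] [LawfulBEq α] (a : α) :
    ∀ (t s : List α), a ∉ t →
      List.foldl PySem.Set.add (a :: s) t = a :: List.foldl PySem.Set.add s t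
  | [], _, _ => rfl
  | x :: t, s, ha => by
    have hxa : x ≠ a := fun h => ha (h ▸ List.mem_cons_self)
    have hadd : PySem.Set.add (a :: s) x = a :: PySem.Set.add s x := by
      rw [PySem.Set.add_eq_ite, PySem.Set.add_eq_ite]
      by_cases hm : x ∈ s
      · simp [List.mem_cons, hm]
      · simp [List.mem_cons, hm, hxa]
    simp only [List.foldl_cons, hadd]
    exact foldl_add_cons_of_not_mem a t _ (fun h => ha (List.mem_cons_of_mem _ h))

-- Set.ofList of a cons: the head, then ofList of the tail with all copies of the head removed
theorem ofList_cons_filter {α : Type} [BEq α] [LawfulBEq α] (k : α) (t : List α) :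
    PySem.Set.ofList (k :: t) = k :: PySem.Set.ofList (t.filter (fun x => x != k)) := by
  have h1 : PySem.Set.ofList (k :: t) = List.foldl PySem.Set.add [k] t := by
    rw [PySem.Set.ofList_eq_foldl]; rfl
  rw [h1, foldl_add_filter_ne k t [k] List.mem_cons_self,
      foldl_add_cons_of_not_mem k _ _ (by simp [List.mem_filter]),
      PySem.Set.ofList_eq_foldl]

-- one round of Source B's while loop: the head key with its group size, then the rest
theorem groupCount_cons (k : String) (t : List String) :
    groupCount (k :: t) =
      (k, ((k :: t).count k : Int)) :: groupCount (t.filter (fun x => x != k)) := by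
  rw [groupCount]
  have h2 : (k :: t).filter (fun x => x != k) = t.filter (fun x => x != k) := by simp
  have h3 : ((k :: t).filter (fun x => x == k)).length = (k :: t).count k := by
    simp [List.count_eq_countP, List.countP_eq_length_filter]
  rw [h2, h3]

-- B's partition recursion computes exactly the (first-occurrence key, count) pairs
theorem groupCount_eq (ks : List String) :
    groupCount ks = (PySem.Set.ofList ks).map (fun k => (k, (ks.count k : Int))) := by
  induction ks using groupCount.induct with
  | case1 => rw [groupCount]; rfl
  | case2 k t ih =>
    have h2 : (k :: t).filter (fun x => x != k) = t.filter (fun x => x != k) := by simp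
    rw [h2] at ih
    rw [groupCount_cons, ofList_cons_filter, ih, List.map_cons]
    refine congrArg _ ?_
    apply List.map_congr_left
    intro a ha
    have haf : a ∈ t.filter (fun x => x != k) := (PySem.Set.mem_ofList _ _).1 ha
    have hak : a ≠ k := by
      have := (List.mem_filter.1 haf).2; simpa using this
    have hc : (t.filter (fun x => x != k)).count a = (k :: t).count a := by
      simp [List.count_filter, hak, Ne.symm hak, bne]
    rw [hc]

-- ===== VERDICT (by name: the statement is the Claim_ definition above) =====
theorem count_py_spec : Claim_equal_count_py := by
  intro items key _
  unfold Spec_count_py count_py_alt count_py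
  have h : (items.foldl (fun out it =>
      let v0 := ((PySem.Dict.mk it).get? key).getD ""
      let v := if v0 = "" then "unknown" else v0
      out.insert v (out.getD v 0 + 1)) PySem.Dict.empty)
      = PySem.Dict.counter (items.map (fun it =>
          let v := ((PySem.Dict.mk it).get? key).getD ""
          if v = "" then "unknown" else v)) := by
    rw [← PySem.Dict.foldl_insert_getD_add_one_eq_counter, List.foldl_map]
  rw [h, PySem.Dict.items_counter, groupCount_eq]
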